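-- pv_equiv track=rewrite | github.com/Ericmok0312/UBS_Challenge | routes/dealer.py | riffle_shuffle
-- ===== SOURCE A (Python) =====
-- def riffle_shuffle(deck):
--     # Ensure the deck is a list
--     if not isinstance(deck, list):
--         deck = list(deck)
--
--     mid = len(deck) // 2
--     shuffled_deck = []
--     left, right = deck[:mid], deck[mid:]
--
--     while left or right:
--         if left:
--             shuffled_deck.append(left.pop(0))
--         if right:
--             shuffled_deck.append(right.pop(0))
--     return shuffled_deck
-- ===== SOURCE B (Python) =====
-- def riffle_shuffle(deck):
--     if not isinstance(deck, list):
--         deck = list(deck)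
--     mid = len(deck) // 2
--     left, right = deck[:mid], deck[mid:]
--     out = []
--     for l, r in zip(left, right):
--         out.append(l)
--         out.append(r)
--     out.extend(right[len(left):])
--     return out
-- ===== Notes on version B (the rewrite author's own statement) =====
-- stated objective: faster
-- what changed: Replaced the while-loop that repeatedly pops the first element of each half (each pop(0) shifts the whole list, O(n^2)) by a single zip pass over the two halves plus the leftover tail of the right half, O(n).
import Mathlib
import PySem

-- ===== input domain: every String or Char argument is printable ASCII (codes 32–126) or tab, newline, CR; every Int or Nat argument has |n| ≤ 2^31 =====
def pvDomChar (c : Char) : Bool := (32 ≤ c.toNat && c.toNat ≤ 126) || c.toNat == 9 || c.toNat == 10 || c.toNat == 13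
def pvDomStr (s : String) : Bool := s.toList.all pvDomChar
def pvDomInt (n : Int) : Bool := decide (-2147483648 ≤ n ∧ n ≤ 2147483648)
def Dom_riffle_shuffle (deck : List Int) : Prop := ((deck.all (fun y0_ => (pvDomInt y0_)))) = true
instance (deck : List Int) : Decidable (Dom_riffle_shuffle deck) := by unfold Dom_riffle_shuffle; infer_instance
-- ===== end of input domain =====

-- B replaces A's quadratic pop(0) while-loop by a single O(n) zip pass over the two halves.


-- ===== PORT A =====
-- while left or right: if left: append left.pop(0); if right: append right.pop(0)
def riffleLoopA : List Int → List Int → List Int → List Int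
  | [], [], acc => acc
  | l :: ls, r :: rs, acc => riffleLoopA ls rs (acc ++ [l, r])
  | l :: ls, [], acc => riffleLoopA ls [] (acc ++ [l])
  | [], r :: rs, acc => riffleLoopA [] rs (acc ++ [r])
  termination_by l r _ => l.length + r.length

def riffle_shuffle (deck : List Int) : List Int :=
  let mid := deck.length / 2
  riffleLoopA (deck.take mid) (deck.drop mid) []

-- ===== PORT B =====
-- for l, r in zip(left, right): append l; append r; then extend with right[len(left):]
def riffle_shuffle_alt (deck : List Int) : List Int :=
  let mid := deck.length / 2
  let left := deck.take mid
  let right := deck.drop mid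
  ((left.zip right).flatMap (fun p => [p.1, p.2])) ++ right.drop left.length

-- ===== PRECONDITION & SPEC =====
def Spec_riffle_shuffle (deck : List Int) (out : List Int) : Prop := out = riffle_shuffle_alt deck
instance (deck : List Int) (out : List Int) : Decidable (Spec_riffle_shuffle deck out) := by unfold Spec_riffle_shuffle; infer_instance

-- ===== CLAIM (what is proved, stated in full; the proofs are below) =====
def Claim_equal_riffle_shuffle : Prop := ∀ (deck : List Int), Dom_riffle_shuffle deck → Spec_riffle_shuffle deck (riffle_shuffle deck)

-- ===== LEMMAS AND PROOFS =====
theorem riffleLoopA_nil_left (r acc : List Int) : riffleLoopA [] r acc = acc ++ r := by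
  induction r generalizing acc with
  | nil => simp [riffleLoopA]
  | cons y ys ih => simp [riffleLoopA, ih]

theorem riffleLoopA_eq (l : List Int) :
    ∀ (r acc : List Int), l.length ≤ r.length →
    riffleLoopA l r acc =
      acc ++ ((l.zip r).flatMap (fun p => [p.1, p.2])) ++ r.drop l.length := by
  induction l with
  | nil => intro r acc _; simp [riffleLoopA_nil_left]
  | cons x ls ih =>
    intro r acc h
    cases r with
    | nil => simp at h
    | cons y rs =>
      simp only [List.length_cons, Nat.add_le_add_iff_right] at h
      simp [riffleLoopA, ih rs (acc ++ [x, y]) h, List.zip, List.flatMap]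

theorem riffle_shuffle_spec : Claim_equal_riffle_shuffle := by
  intro deck _
  unfold Spec_riffle_shuffle riffle_shuffle riffle_shuffle_alt
  have h : (deck.take (deck.length / 2)).length ≤ (deck.drop (deck.length / 2)).length := by
    simp only [List.length_take, List.length_drop]
    omega
  simp [riffleLoopA_eq _ _ _ h]
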